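-- pv_equiv track=rewrite | github.com/daniel-reich/ubiquitous-fiesta | f6X7pa38iQyoytJgr_5.py | increasing_word_weights
-- ===== SOURCE A (Python) =====
-- def increasing_word_weights(sentence):
--     import string
--     a=string.punctuation
--     x=[]
--     for i in sentence.split():
--         y=[]
--         for j in i:
--             if j not in a:
--                 y.append(ord(j))
--         x.append(sum(y))
--     return True if x==sorted(x) else False
-- ===== SOURCE B (Python) =====
-- def increasing_word_weights(sentence):
--     import string
--     punct = frozenset(string.punctuation)
--     prev = None
--     for word in sentence.split():
--         w = sum(ord(c) for c in word if c not in punct)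
--         if prev is not None and w < prev:
--             return False
--         prev = w
--     return True
-- ===== Notes on version B (the rewrite author's own statement) =====
-- stated objective: alternative
-- what changed: B checks the word weights are non-decreasing in a single early-exit scan with the previous weight as state (punctuation in a frozenset), instead of building the whole weight list and comparing it with its sort; runtime is dominated by the character scan, so the measured cost is the same.
import Mathlib
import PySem

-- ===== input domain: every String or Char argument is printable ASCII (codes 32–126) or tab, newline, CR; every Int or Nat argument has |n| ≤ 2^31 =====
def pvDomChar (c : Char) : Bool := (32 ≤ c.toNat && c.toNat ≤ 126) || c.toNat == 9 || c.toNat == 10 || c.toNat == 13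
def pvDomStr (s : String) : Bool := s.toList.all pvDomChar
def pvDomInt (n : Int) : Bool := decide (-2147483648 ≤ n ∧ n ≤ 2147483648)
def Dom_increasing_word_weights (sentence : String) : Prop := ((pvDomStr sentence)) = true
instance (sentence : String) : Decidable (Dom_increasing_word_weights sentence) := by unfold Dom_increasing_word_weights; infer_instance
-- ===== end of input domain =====

-- B is a single early-exit non-decreasing scan of the word weights instead of A's build-list-then-sort-and-compare (an alternative algorithm; measured cost is the same).

-- string.punctuation
def pvPunct : List Char := "!\"#$%&'()*+,-./:;<=>?@[\\]^_`{|}~".toList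

-- ===== PORT A =====
def increasing_word_weights (sentence : String) : Bool :=
  let a := pvPunct
  let x := (PySem.Str.split₀ sentence).foldl (fun x i =>
      let y := i.toList.foldl (fun y j =>
          if ¬ a.contains j then y ++ [((j.toNat : Int))] else y) []
      x ++ [y.sum]) []
  if x = PySem.List.sorted x (fun v : Int => v) false then true else false

-- ===== PORT B =====
def pvPunctSet : PySem.Set Char := PySem.Set.ofList pvPunct

def pvWeightB (w : List Char) : Int :=
  ((w.filter (fun c => ¬ pvPunctSet.contains c)).map (fun c => ((c.toNat : Int)))).sum

def pvGoB (prev : Option Int) : List String → Bool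
  | [] => true
  | w :: ws =>
    let x := pvWeightB w.toList
    match prev with
    | some p => if x < p then false else pvGoB (some x) ws
    | none => pvGoB (some x) ws

def increasing_word_weights_alt (sentence : String) : Bool :=
  pvGoB none (PySem.Str.split₀ sentence)

-- ===== PRECONDITION & SPEC =====
def Spec_increasing_word_weights (sentence : String) (out : Bool) : Prop := out = increasing_word_weights_alt sentence
instance (sentence : String) (out : Bool) : Decidable (Spec_increasing_word_weights sentence out) := by unfold Spec_increasing_word_weights; infer_instance

-- ===== CLAIM (what is proved, stated in full; the proofs are below) =====
def Claim_equal_increasing_word_weights : Prop := ∀ (sentence : String), Dom_increasing_word_weights sentence → Spec_increasing_word_weights sentence (increasing_word_weights sentence)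

-- ===== LEMMAS AND PROOFS =====

-- A's inner loop computes the filtered-map sum (B's weight)
theorem pvWeight_eq (w : List Char) (acc : List Int) :
    (w.foldl (fun y j => if ¬ pvPunct.contains j then y ++ [((j.toNat : Int))] else y) acc).sum
      = acc.sum + pvWeightB w := by
  induction w generalizing acc with
  | nil => simp [pvWeightB]
  | cons c cs ih =>
    by_cases h : c ∈ pvPunct
    · have ha : (if ¬ pvPunct.contains c then acc ++ [((c.toNat : Int))] else acc) = acc := by
        simp [h]
      rw [List.foldl_cons, ha, ih]
      simp [pvWeightB, List.filter_cons, h, pvPunctSet, PySem.Set.mem_ofList]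
    · have ha : (if ¬ pvPunct.contains c then acc ++ [((c.toNat : Int))] else acc)
          = acc ++ [((c.toNat : Int))] := by simp [h]
      rw [List.foldl_cons, ha, ih]
      simp [pvWeightB, List.filter_cons, h, pvPunctSet, PySem.Set.mem_ofList]
      ring

-- A's outer loop builds the list of weights of the words
theorem pvX_eq (ws : List String) (acc : List Int) :
    ws.foldl (fun x i =>
        x ++ [(i.toList.foldl (fun y j =>
          if ¬ pvPunct.contains j then y ++ [((j.toNat : Int))] else y) []).sum]) acc
      = acc ++ ws.map (fun i => pvWeightB i.toList) := by
  induction ws generalizing acc with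
  | nil => simp
  | cons w ws ih =>
    have hw : (w.toList.foldl (fun y j =>
        if ¬ pvPunct.contains j then y ++ [((j.toNat : Int))] else y) []).sum
          = pvWeightB w.toList := by simpa using pvWeight_eq w.toList []
    rw [List.foldl_cons, ih, hw]
    simp

theorem pvGoB_some (ws : List String) (p : Int) :
    pvGoB (some p) ws = true
      ↔ List.IsChain (· ≤ ·) (p :: ws.map (fun i => pvWeightB i.toList)) := by
  induction ws generalizing p with
  | nil => simp [pvGoB]
  | cons w ws ih =>
    by_cases h : pvWeightB w.toList < p <;>
      simp [pvGoB, h, ih, List.isChain_cons_cons] <;> omega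

theorem pvGoB_none (ws : List String) :
    pvGoB none ws = true
      ↔ List.IsChain (· ≤ ·) (ws.map (fun i => pvWeightB i.toList)) := by
  cases ws with
  | nil => simp [pvGoB]
  | cons w ws =>
    simpa [pvGoB] using pvGoB_some ws (pvWeightB w.toList)

theorem pvSorted_iff (xs : List Int) :
    xs = PySem.List.sorted xs (fun v : Int => v) false ↔ xs.Pairwise (· ≤ ·) := by
  constructor
  · intro h
    have := PySem.List.sorted_pairwise xs (fun v : Int => v)
    rw [← h] at this
    simpa using this
  · intro h
    exact (PySem.List.sorted_eq_self_of_pairwise _ _ (by simpa using h)).symm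

-- ===== VERDICT (by name: the statement is the Claim_ definition above) =====
theorem increasing_word_weights_spec : Claim_equal_increasing_word_weights := by
  intro sentence _
  unfold Spec_increasing_word_weights increasing_word_weights increasing_word_weights_alt
  simp only [pvX_eq, List.nil_append]
  rw [Bool.eq_iff_iff, pvGoB_none, List.isChain_iff_pairwise]
  constructor
  · intro hif
    by_cases h : (PySem.Str.split₀ sentence).map (fun i => pvWeightB i.toList)
        = PySem.List.sorted ((PySem.Str.split₀ sentence).map (fun i => pvWeightB i.toList))
            (fun v : Int => v) false
    · exact (pvSorted_iff _).mp h
    · simp [h] at hif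
  · intro hp
    rw [if_pos]
    exact (pvSorted_iff _).mpr hp
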